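-- pv_equiv track=rewrite | github.com/peteh/smrt-chatbot | smrt/bot/pipeline/pipeline.py | extract_command_full
-- ===== SOURCE A (Python) =====
-- def extract_command_full(data: str) -> tuple[str, str, str] | None:
--     """Extracts commands from a text"""
--     left_over = data.strip()
--     if not left_over.startswith("#"):
--         return None
--     length = 0
--     for i in range(1, len(left_over)):
--         if left_over[i].isalnum() or left_over[i] == "_":
--             length += 1
--         else:
--             break
--     if length == 0:
--         return None
--     command = left_over[1:1 + length]
--     left_over = left_over[1 + length:]
--
--     params = ""
--     if len(left_over) > 0 and left_over[0] == "(":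
--         end_parentesis = left_over.find(")")
--         if end_parentesis == -1:
--             return None
--         params = left_over[1:end_parentesis]
--         left_over = left_over[end_parentesis+1:]
--
--     left_over = left_over.strip()
--     return (command, params, left_over)
-- ===== SOURCE B (Python) =====
-- def extract_command_full(data: str):
--     """Extracts commands from a text.
--
--     Single-pass finite state machine over the stripped text:
--     state 0 expects '#', state 1 accumulates the command token,
--     state 2 accumulates params until the closing parenthesis, state 3 accumulates the rest.
--     """
--     state = 0
--     cmd, params, rest = [], [], []
--     closed = True
--     for c in data.strip():
--         if state == 0:
--             if c != "#":
--                 return None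
--             state = 1
--         elif state == 1:
--             if c.isalnum() or c == "_":
--                 cmd.append(c)
--             elif c == "(":
--                 state = 2
--                 closed = False
--             else:
--                 state = 3
--                 rest.append(c)
--         elif state == 2:
--             if c == ")":
--                 state = 3
--                 closed = True
--             else:
--                 params.append(c)
--         else:
--             rest.append(c)
--     if state == 0 or not cmd or not closed:
--         return None
--     return ("".join(cmd), "".join(params), "".join(rest).strip())
-- ===== Notes on version B (the rewrite author's own statement) =====
-- stated objective: alternative
-- what changed: Replaces A's staged slicing (startswith, counting loop, find of the closing parenthesis, repeated slices) with a single left-to-right pass driven by an explicit 4-state finite state machine with accumulators for command, params and rest.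
import Mathlib
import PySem

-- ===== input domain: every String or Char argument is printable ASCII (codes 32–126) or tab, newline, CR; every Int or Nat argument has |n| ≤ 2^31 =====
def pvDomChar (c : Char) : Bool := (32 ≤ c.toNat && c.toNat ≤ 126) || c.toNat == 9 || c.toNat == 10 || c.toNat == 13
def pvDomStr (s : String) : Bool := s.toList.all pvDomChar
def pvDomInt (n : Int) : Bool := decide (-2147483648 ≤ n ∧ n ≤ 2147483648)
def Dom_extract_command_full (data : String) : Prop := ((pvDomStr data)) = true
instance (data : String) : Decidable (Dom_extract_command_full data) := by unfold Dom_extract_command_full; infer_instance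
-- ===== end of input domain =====

-- B replaces A's staged slicing (count loop, find of the closing paren, repeated slices) with a single
-- left-to-right pass driven by an explicit 4-state machine with accumulators: alternative, same cost.

-- ===== PORT A =====

-- c.isalnum() or c == "_"
def pvWordA (c : Char) : Bool := PySem.Chars.isalnum c || c == '_'

-- the 'for i in range(1, len(left_over)) … break' loop accumulating `length`
def pvLenLoopA : List Char → Nat → Nat
  | [], length => length
  | c :: rest, length => if pvWordA c then pvLenLoopA rest (length + 1) else length

def extract_command_full (data : String) : Option (String × String × String) :=
  let leftOver := PySem.Chars.strip data.toList
  if !(PySem.Chars.startswith leftOver ['#']) then none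
  else
    let length := pvLenLoopA (leftOver.drop 1) 0
    if length = 0 then none
    else
      let command := PySem.Chars.slice leftOver (some 1) (some (1 + (length : Int)))
      let leftOver2 := PySem.Chars.slice leftOver (some (1 + (length : Int))) none
      -- if len(left_over) > 0 and left_over[0] == "(":
      if PySem.Chars.startswith leftOver2 ['('] then
        let endParentesis := PySem.Chars.find leftOver2 [')']
        if endParentesis = -1 then none
        else
          let params := PySem.Chars.slice leftOver2 (some 1) (some endParentesis)
          let leftOver3 := PySem.Chars.slice leftOver2 (some (endParentesis + 1)) none
          some (String.ofList command, String.ofList params, String.ofList (PySem.Chars.strip leftOver3))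
      else some (String.ofList command, "", String.ofList (PySem.Chars.strip leftOver2))

-- ===== PORT B =====

-- Source B's 'c.isalnum() or c == "_"' test (same predicate as A's)
def pvWordB (c : Char) : Bool := PySem.Chars.isalnum c || c == '_'

-- one iteration of Source B's for-loop; `none` models the early 'return None',
-- the state is (state, cmd, params, rest, closed)
def pvStepB (acc : Option (Nat × List Char × List Char × List Char × Bool)) (c : Char) :
    Option (Nat × List Char × List Char × List Char × Bool) :=
  match acc with
  | none => none
  | some (st, cmd, params, rest, closed) =>
    if st = 0 then
      if c ≠ '#' then none else some (1, cmd, params, rest, closed)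
    else if st = 1 then
      if pvWordB c then some (1, cmd ++ [c], params, rest, closed)
      else if c = '(' then some (2, cmd, params, rest, false)
      else some (3, cmd, params, rest ++ [c], closed)
    else if st = 2 then
      if c = ')' then some (3, cmd, params, rest, true)
      else some (2, cmd, params ++ [c], rest, closed)
    else some (3, cmd, params, rest ++ [c], closed)

def extract_command_full_alt (data : String) : Option (String × String × String) :=
  let s := PySem.Chars.strip data.toList
  match s.foldl pvStepB (some (0, [], [], [], true)) with
  | none => none
  | some (st, cmd, params, rest, closed) =>
    if st = 0 ∨ cmd = [] ∨ closed = false then none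
    else some (String.ofList cmd, String.ofList params, String.ofList (PySem.Chars.strip rest))

-- ===== PRECONDITION & SPEC =====
def Spec_extract_command_full (data : String) (out : Option (String × String × String)) : Prop := out = extract_command_full_alt data
instance (data : String) (out : Option (String × String × String)) : Decidable (Spec_extract_command_full data out) := by unfold Spec_extract_command_full; infer_instance

-- ===== CLAIM (what is proved, stated in full; the proofs are below) =====
def Claim_equal_extract_command_full : Prop := ∀ (data : String), Dom_extract_command_full data → Spec_extract_command_full data (extract_command_full data)

-- ===== LEMMAS AND PROOFS =====

theorem pvWordB_eq : pvWordB = pvWordA := rfl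

theorem pvLenLoopA_acc (t : List Char) (a : Nat) : pvLenLoopA t a = a + pvLenLoopA t 0 := by
  induction t generalizing a with
  | nil => simp [pvLenLoopA]
  | cons c r ih =>
    by_cases h : pvWordA c <;> simp [pvLenLoopA, h]
    rw [ih (a+1), ih 1]; omega

theorem pvLenLoopA_eq_takeWhile (u : List Char) :
    pvLenLoopA u 0 = (u.takeWhile pvWordA).length := by
  induction u with
  | nil => rfl
  | cons c r ih =>
    by_cases h : pvWordA c
    · simp [pvLenLoopA, h, pvLenLoopA_acc r 1, ih]; omega
    · simp [pvLenLoopA, h]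

theorem foldB_none (v : List Char) : v.foldl pvStepB none = none := by
  induction v with
  | nil => rfl
  | cons c r ih => simpa [pvStepB] using ih

theorem foldB_state3 (v cmd params rest : List Char) (closed : Bool) :
    v.foldl pvStepB (some (3, cmd, params, rest, closed)) = some (3, cmd, params, rest ++ v, closed) := by
  induction v generalizing rest with
  | nil => simp
  | cons c r ih => simp [pvStepB, ih (rest ++ [c])]

theorem foldB_state2_no (v cmd params rest : List Char) (closed : Bool) (h : ')' ∉ v) :
    v.foldl pvStepB (some (2, cmd, params, rest, closed)) = some (2, cmd, params ++ v, rest, closed) := by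
  induction v generalizing params with
  | nil => simp
  | cons c r ih =>
    have hc : c ≠ ')' := fun e => h (by simp [e])
    have hr := ih (params ++ [c]) (fun m => h (by simp [m]))
    simp [pvStepB, hc, hr]

theorem foldB_state2_found (p q cmd params rest : List Char) (closed : Bool) (h : ')' ∉ p) :
    (p ++ ')' :: q).foldl pvStepB (some (2, cmd, params, rest, closed))
      = some (3, cmd, params ++ p, rest ++ q, true) := by
  induction p generalizing params with
  | nil => simp [pvStepB, foldB_state3]
  | cons c r ih =>
    have hc : c ≠ ')' := fun e => h (by simp [e])
    have hr := ih (params ++ [c]) (fun m => h (by simp [m]))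
    simp [pvStepB, hc] at hr ⊢
    simpa using hr

theorem foldB_state1_word (w : List Char) (cmd params rest : List Char) (closed : Bool)
    (h : ∀ c ∈ w, pvWordB c = true) :
    w.foldl pvStepB (some (1, cmd, params, rest, closed)) = some (1, cmd ++ w, params, rest, closed) := by
  induction w generalizing cmd with
  | nil => simp
  | cons c r ih =>
    have hc : pvWordB c = true := h c (by simp)
    have hr := ih (cmd ++ [c]) (fun x m => h x (by simp [m]))
    simp [pvStepB, hc] at hr ⊢
    simpa using hr

theorem dropWhile_head_false {α : Type} (p : α → Bool) (u : List α) (c : α) (t2 : List α)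
    (h : u.dropWhile p = c :: t2) : p c = false := by
  induction u with
  | nil => simp at h
  | cons a r ih =>
    by_cases hp : p a
    · rw [List.dropWhile_cons_of_pos hp] at h; exact ih h
    · rw [List.dropWhile_cons_of_neg hp] at h
      cases h; simpa using hp

theorem find_paren (t2 p q : List Char) (hp : ')' ∉ p) (ht : t2 = p ++ ')' :: q) :
    PySem.Chars.find ('(' :: t2) [')'] = ((p.length + 1 : Nat) : Int) := by
  subst ht
  set s := '(' :: (p ++ ')' :: q) with hs
  have hinf : [')'] <:+: s := by
    exact (List.singleton_infix_iff _ _).mpr (by rw [hs]; simp)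
  have hge : 0 ≤ PySem.Chars.find s [')'] := (PySem.Chars.find_nonneg_iff s [')']).mpr hinf
  obtain ⟨hpre, hmin⟩ := PySem.Chars.find_spec (s := s) (sub := [')']) hge
  set n := (PySem.Chars.find s [')']).toNat with hn
  have hhead : s[n]? = some ')' := by
    rw [← List.head?_drop]
    rcases hpre with ⟨v, hv⟩
    rw [← hv]; rfl
  have hnot : ∀ i, i < p.length + 1 → s[i]? ≠ some ')' := by
    intro i hi he
    match i, hi with
    | 0, _ => simp [hs] at he
    | (j+1), hj =>
      have hj' : j < p.length := by omega
      have : s[j+1]? = p[j]? := by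
        simp only [hs, List.getElem?_cons_succ]
        rw [List.getElem?_append_left hj']
      rw [this, List.getElem?_eq_getElem hj'] at he
      have hpj : p[j] = ')' := Option.some_inj.mp he
      exact hp (hpj ▸ List.getElem_mem hj')
  have hge' : p.length + 1 ≤ n := by
    by_contra hlt
    exact hnot n (by omega) hhead
  have hle : n ≤ p.length + 1 := by
    by_contra hgt
    refine hmin (p.length + 1) (by omega) ?_
    have : s.drop (p.length + 1) = ')' :: q := by
      simp [hs, List.drop_left']
    rw [this]
    exact ⟨q, rfl⟩
  have : n = p.length + 1 := by omega
  omega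

-- ===== VERDICT (by name: the statement is the Claim_ definition above) =====
theorem extract_command_full_spec : Claim_equal_extract_command_full := by
  intro data _
  unfold Spec_extract_command_full extract_command_full extract_command_full_alt
  generalize PySem.Chars.strip data.toList = s
  match s with
  | [] => decide
  | c :: u =>
    by_cases hc : c = '#'
    · subst hc
      have hsw : PySem.Chars.startswith ('#' :: u) ['#'] = true :=
        (PySem.Chars.startswith_iff _ _).mpr ⟨u, rfl⟩
      set w := u.takeWhile pvWordA with hwdef
      set t := u.dropWhile pvWordA with htdef
      have hu : w ++ t = u := List.takeWhile_append_dropWhile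
      have hwmem : ∀ x ∈ w, pvWordB x = true := fun x m => List.mem_takeWhile_imp m
      have hL : pvLenLoopA (('#' :: u).drop 1) 0 = w.length := by
        simpa using pvLenLoopA_eq_takeWhile u
      have hcmd : PySem.Chars.slice ('#' :: u) (some 1)
          (some (1 + ((pvLenLoopA (('#' :: u).drop 1) 0 : Nat) : Int))) = w := by
        rw [hL, PySem.Chars.slice_eq_listSlice,
          PySem.List.slice_toNat _ (by norm_num) (by positivity)]
        have h1 : ((1 : Int)).toNat = 1 := rfl
        have h2 : ((1 : Int) + (w.length : Int)).toNat = 1 + w.length := by omega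
        rw [h1, h2]
        simp [← hu]
      have hrest : PySem.Chars.slice ('#' :: u)
          (some (1 + ((pvLenLoopA (('#' :: u).drop 1) 0 : Nat) : Int))) none = t := by
        rw [hL, PySem.Chars.slice_eq_listSlice, PySem.List.slice_from _ (by positivity)]
        have h2 : ((1 : Int) + (w.length : Int)).toNat = 1 + w.length := by omega
        rw [h2, show (1 + w.length) = w.length + 1 by omega, List.drop_succ_cons, ← hu,
          List.drop_left]
      have hfold1 : ('#' :: u).foldl pvStepB (some (0, [], [], [], true))
          = t.foldl pvStepB (some (1, w, [], [], true)) := by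
        have hstep : pvStepB (some (0, [], [], [], true)) '#' = some (1, [], [], [], true) := by
          simp [pvStepB]
        rw [List.foldl_cons, hstep, ← hu, List.foldl_append,
          foldB_state1_word w [] [] [] true hwmem]
        simp
      simp only [hsw, Bool.not_true, Bool.false_eq_true, if_false, hcmd, hrest, hfold1]
      have hlenu : pvLenLoopA u 0 = w.length := by simpa using hL
      match htv : t with
      | [] =>
        have hswp : PySem.Chars.startswith ([] : List Char) ['('] = false := by decide
        by_cases hw0 : w = []
        · have hlen0 : pvLenLoopA u 0 = 0 := by simp [hlenu, hw0]
          simp [hlen0, hw0]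
        · have hlen : ¬ pvLenLoopA u 0 = 0 := by rw [hlenu]; simpa using hw0
          simp [hlen, hswp, hw0]
      | d :: t2 =>
        have hd : pvWordA d = false := dropWhile_head_false pvWordA u d t2 htdef.symm
        have hdB : pvWordB d = false := by rw [pvWordB_eq]; exact hd
        by_cases hdp : d = '('
        · subst hdp
          have hswp : PySem.Chars.startswith ('(' :: t2) ['('] = true :=
            (PySem.Chars.startswith_iff _ _).mpr ⟨t2, rfl⟩
          have hstep2 : pvStepB (some (1, w, [], [], true)) '(' = some (2, w, [], [], false) := by
            simp [pvStepB, hdB]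
          by_cases hin : ')' ∈ t2
          · -- first ')' splits t2 = P ++ ')' :: q
            set P := t2.takeWhile (fun x => x != ')') with hPdef
            have hsplitw := List.takeWhile_append_dropWhile (p := fun x => x != ')') (l := t2)
            have hPmem : ')' ∉ P := by
              intro m
              have := List.mem_takeWhile_imp m
              simp at this
            obtain ⟨d2, q, hdq⟩ : ∃ d2 q, t2.dropWhile (fun x => x != ')') = d2 :: q := by
              match hdw : t2.dropWhile (fun x => x != ')') with
              | [] =>
                exfalso
                rw [hdw, List.append_nil] at hsplitw
                have := List.mem_takeWhile_imp (l := t2) (p := fun x => x != ')')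
                  (hsplitw ▸ hin)
                simp at this
              | d2 :: q => exact ⟨d2, q, rfl⟩
            have hd2 : d2 = ')' := by
              have := dropWhile_head_false (fun x => x != ')') t2 d2 q hdq
              simpa using this
            have ht2 : t2 = P ++ ')' :: q := by
              rw [← hsplitw, hdq, hd2]
            have hfind : PySem.Chars.find ('(' :: t2) [')'] = ((P.length + 1 : Nat) : Int) :=
              find_paren t2 P q hPmem ht2
            have hfne : ¬ (((P.length + 1 : Nat) : Int) = -1) := by omega
            have hparams : PySem.Chars.slice ('(' :: t2) (some 1) (some ((P.length + 1 : Nat) : Int)) = P := by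
              rw [PySem.Chars.slice_eq_listSlice, PySem.List.slice_toNat _ (by norm_num) (by positivity)]
              have h1 : ((1 : Int)).toNat = 1 := rfl
              have h2 : (((P.length + 1 : Nat) : Int)).toNat = P.length + 1 := by omega
              rw [h1, h2, ht2]
              simp
            have hafter : PySem.Chars.slice ('(' :: t2) (some (((P.length + 1 : Nat) : Int) + 1)) none = q := by
              rw [PySem.Chars.slice_eq_listSlice, PySem.List.slice_from _ (by positivity)]
              have h2 : ((((P.length + 1 : Nat) : Int)) + 1).toNat = P.length + 2 := by omega
              rw [h2, ht2, show ('(' :: (P ++ ')' :: q)) = ('(' :: P ++ [')']) ++ q by simp]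
              rw [show P.length + 2 = ('(' :: P ++ [')']).length by simp]
              exact List.drop_left
            have hfold2 : t2.foldl pvStepB (some (2, w, [], [], false)) = some (3, w, P, q, true) := by
              rw [ht2]
              simpa using foldB_state2_found P q w [] [] false hPmem
            by_cases hw0 : w = []
            · have hlen0 : pvLenLoopA u 0 = 0 := by simp [hlenu, hw0]
              simp only [List.foldl_cons, hstep2, hfold2]
              simp [hlen0, hw0]
            · have hlen : ¬ pvLenLoopA u 0 = 0 := by rw [hlenu]; simpa using hw0
              simp only [List.foldl_cons, hstep2, hfold2]
              push_cast at hparams hafter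
              rw [PySem.Chars.slice_eq_listSlice] at hparams hafter
              simp [hlen, hswp, hfind, hw0]
              exact ⟨by omega, by rw [hparams], by rw [hafter]⟩
          · -- no ')': A find = -1, B never closes
            have hfind : PySem.Chars.find ('(' :: t2) [')'] = -1 := by
              rw [PySem.Chars.find_eq_neg_one_iff]
              intro hinf
              have : ')' ∈ '(' :: t2 := (List.singleton_infix_iff _ _).mp hinf
              simp at this
              exact hin this
            have hfold2 : t2.foldl pvStepB (some (2, w, [], [], false)) = some (2, w, t2, [], false) := by
              simpa using foldB_state2_no t2 w [] [] false hin
            by_cases hw0 : w = []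
            · have hlen0 : pvLenLoopA u 0 = 0 := by simp [hlenu, hw0]
              simp only [List.foldl_cons, hstep2, hfold2]
              simp [hlen0, hw0]
            · have hlen : ¬ pvLenLoopA u 0 = 0 := by rw [hlenu]; simpa using hw0
              simp only [List.foldl_cons, hstep2, hfold2]
              simp [hlen, hswp, hfind]
        · -- first non-word char is not '(' : everything after the command is rest
          have hswp : PySem.Chars.startswith (d :: t2) ['('] = false := by
            rw [Bool.eq_false_iff]
            intro h
            obtain ⟨v, hv⟩ := (PySem.Chars.startswith_iff _ _).mp h
            simp at hv
            exact hdp hv.1.symm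
          have hstep3 : pvStepB (some (1, w, [], [], true)) d = some (3, w, [], [d], true) := by
            simp [pvStepB, hdB, hdp]
          have hfold2 : t2.foldl pvStepB (some (3, w, [], [d], true)) = some (3, w, [], d :: t2, true) := by
            simpa using foldB_state3 t2 w [] [d] true
          by_cases hw0 : w = []
          · have hlen0 : pvLenLoopA u 0 = 0 := by simp [hlenu, hw0]
            simp only [List.foldl_cons, hstep3, hfold2]
            simp [hlen0, hw0]
          · have hlen : ¬ pvLenLoopA u 0 = 0 := by rw [hlenu]; simpa using hw0
            simp only [List.foldl_cons, hstep3, hfold2]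
            simp [hlen, hswp, hw0]
    · have hsw : PySem.Chars.startswith (c :: u) ['#'] = false := by
        rw [Bool.eq_false_iff]
        intro h
        obtain ⟨v, hv⟩ := (PySem.Chars.startswith_iff _ _).mp h
        simp at hv
        exact hc hv.1.symm
      have hstep : pvStepB (some (0, [], [], [], true)) c = none := by
        simp [pvStepB, hc]
      simp [hsw, List.foldl_cons, hstep, foldB_none]
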